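-- pv_equiv track=rewrite | github.com/FelipeCupito/sokoban-search-solver | src/heuristics/deadlock.py | _is_corner_deadlock
-- ===== SOURCE A (Python) =====
-- from typing import Tuple, Set, Dict, TYPE_CHECKING
--
-- def _is_corner_deadlock(
--         pos: Tuple[int, int],
--         walls: frozenset[Tuple[int, int]],
--         goals: frozenset[Tuple[int, int]]
-- ) -> bool:
--     """Verifica si la posición es una esquina sin goal"""
--     if pos in goals:
--         return False
--
--     r, c = pos
--     corner_patterns = [
--         [(r - 1, c), (r, c - 1)],  # Superior izquierda
--         [(r - 1, c), (r, c + 1)],  # Superior derecha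
--         [(r + 1, c), (r, c - 1)],  # Inferior izquierda
--         [(r + 1, c), (r, c + 1)],  # Inferior derecha
--     ]
--     return any(all(wp in walls for wp in pattern) for pattern in corner_patterns)
-- ===== SOURCE B (Python) =====
-- from typing import Tuple
--
-- def _is_corner_deadlock(
--         pos: Tuple[int, int],
--         walls: frozenset[Tuple[int, int]],
--         goals: frozenset[Tuple[int, int]]
-- ) -> bool:
--     """Single pass over the walls: classify each wall by its offset from pos
--     (vertically adjacent / horizontally adjacent) into two flags; a corner is
--     a vertical and a horizontal wall neighbour, provided pos is not a goal."""
--     if pos in goals: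
--         return False
--     r, c = pos
--     vert = False
--     horiz = False
--     for wr, wc in walls:
--         if wc == c and abs(wr - r) == 1:
--             vert = True
--         elif wr == r and abs(wc - c) == 1:
--             horiz = True
--     return vert and horiz
-- ===== Notes on version B (the rewrite author's own statement) =====
-- stated objective: alternative
-- what changed: Instead of probing the four neighbour cells against the walls set via a 4x2 pattern table with any/all, B makes one pass over the walls collection, classifying each wall by its offset from pos into a vertical-adjacent and a horizontal-adjacent flag, and returns their conjunction.
import Mathlib
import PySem

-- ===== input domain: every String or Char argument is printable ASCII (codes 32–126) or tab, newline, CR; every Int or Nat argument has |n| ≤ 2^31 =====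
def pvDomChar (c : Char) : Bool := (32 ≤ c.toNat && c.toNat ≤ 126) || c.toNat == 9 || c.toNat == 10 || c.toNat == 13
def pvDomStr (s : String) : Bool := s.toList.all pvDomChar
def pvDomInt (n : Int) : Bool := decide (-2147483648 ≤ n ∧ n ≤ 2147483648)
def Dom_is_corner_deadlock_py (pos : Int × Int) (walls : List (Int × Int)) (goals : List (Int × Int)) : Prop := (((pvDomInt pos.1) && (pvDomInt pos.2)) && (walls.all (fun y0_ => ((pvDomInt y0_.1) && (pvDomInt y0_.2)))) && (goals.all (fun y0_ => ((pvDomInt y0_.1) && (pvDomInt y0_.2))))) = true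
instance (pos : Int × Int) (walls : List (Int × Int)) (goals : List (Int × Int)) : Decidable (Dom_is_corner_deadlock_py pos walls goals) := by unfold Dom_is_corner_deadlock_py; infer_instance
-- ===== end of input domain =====

-- ===== PORT A =====
-- B replaces the four-pattern neighbour probing by a single classifying pass over the walls (alternative decomposition).
def is_corner_deadlock_py (pos : Int × Int) (walls : List (Int × Int)) (goals : List (Int × Int)) : Bool :=
  if goals.contains pos then false
  else
    let r := pos.1
    let c := pos.2
    let corner_patterns : List (List (Int × Int)) :=
      [ [(r - 1, c), (r, c - 1)],
        [(r - 1, c), (r, c + 1)],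
        [(r + 1, c), (r, c - 1)],
        [(r + 1, c), (r, c + 1)] ]
    corner_patterns.any (fun pattern => pattern.all (fun wp => walls.contains wp))

-- ===== PORT B =====
-- one step of Source B's loop: classify a wall cell by its offset from (r, c)
def pvClassifyStep (r c : Int) (st : Bool × Bool) (wp : Int × Int) : Bool × Bool :=
  if wp.2 == c && (wp.1 - r).natAbs == 1 then (true, st.2)
  else if wp.1 == r && (wp.2 - c).natAbs == 1 then (st.1, true)
  else st

def is_corner_deadlock_py_alt (pos : Int × Int) (walls : List (Int × Int)) (goals : List (Int × Int)) : Bool :=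
  if goals.contains pos then false
  else
    let r := pos.1
    let c := pos.2
    let flags := walls.foldl (pvClassifyStep r c) (false, false)
    flags.1 && flags.2

-- ===== PRECONDITION & SPEC =====
def Spec_is_corner_deadlock_py (pos : Int × Int) (walls : List (Int × Int)) (goals : List (Int × Int)) (out : Bool) : Prop := out = is_corner_deadlock_py_alt pos walls goals
instance (pos : Int × Int) (walls : List (Int × Int)) (goals : List (Int × Int)) (out : Bool) : Decidable (Spec_is_corner_deadlock_py pos walls goals out) := by unfold Spec_is_corner_deadlock_py; infer_instance

-- ===== CLAIM (what is proved, stated in full; the proofs are below) =====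
def Claim_equal_is_corner_deadlock_py : Prop := ∀ (pos : Int × Int) (walls : List (Int × Int)) (goals : List (Int × Int)), Dom_is_corner_deadlock_py pos walls goals → Spec_is_corner_deadlock_py pos walls goals (is_corner_deadlock_py pos walls goals)

-- ===== LEMMAS AND PROOFS =====

-- the classifying fold computes exactly the two "some vertical / horizontal wall neighbour" flags
theorem pv_fold_flags (r c : Int) (walls : List (Int × Int)) (a b : Bool) :
    walls.foldl (pvClassifyStep r c) (a, b) =
      (a || walls.any (fun wp => wp.2 == c && (wp.1 - r).natAbs == 1),
       b || walls.any (fun wp => wp.1 == r && (wp.2 - c).natAbs == 1)) := by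
  induction walls generalizing a b with
  | nil => simp
  | cons wp ws ih =>
    simp only [List.foldl_cons, List.any_cons]
    rw [ih]
    unfold pvClassifyStep
    cases hc1 : (wp.2 == c && (wp.1 - r).natAbs == 1) with
    | true =>
      have hc2 : (wp.1 == r && (wp.2 - c).natAbs == 1) = false := by
        simp only [Bool.and_eq_true, beq_iff_eq] at hc1
        simp only [Bool.and_eq_false_iff, beq_eq_false_iff_ne, ne_eq]
        right; intro h; omega
      simp [hc2]
    | false =>
      cases hc2 : (wp.1 == r && (wp.2 - c).natAbs == 1) <;> simp

theorem pv_any_vert (r c : Int) (walls : List (Int × Int)) :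
    walls.any (fun wp => wp.2 == c && (wp.1 - r).natAbs == 1) =
      (walls.contains (r - 1, c) || walls.contains (r + 1, c)) := by
  rw [Bool.eq_iff_iff]
  simp only [List.any_eq_true, List.contains_eq_mem, Bool.or_eq_true, decide_eq_true_eq,
    Bool.and_eq_true, beq_iff_eq, Int.natAbs_eq_iff]
  constructor
  · rintro ⟨⟨x, y⟩, hmem, hy, hx⟩
    dsimp only at hy hx
    push_cast at hx
    rcases hx with h | h
    · right
      have hxy : ((r + 1 : Int), c) = (x, y) := by
        rw [Prod.mk.injEq]; exact ⟨by omega, hy.symm⟩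
      rw [hxy]; exact hmem
    · left
      have hxy : ((r - 1 : Int), c) = (x, y) := by
        rw [Prod.mk.injEq]; exact ⟨by omega, hy.symm⟩
      rw [hxy]; exact hmem
  · rintro (h | h)
    · exact ⟨(r - 1, c), h, rfl, by right; push_cast; ring⟩
    · exact ⟨(r + 1, c), h, rfl, by left; push_cast; ring⟩

theorem pv_any_horiz (r c : Int) (walls : List (Int × Int)) :
    walls.any (fun wp => wp.1 == r && (wp.2 - c).natAbs == 1) =
      (walls.contains (r, c - 1) || walls.contains (r, c + 1)) := by
  rw [Bool.eq_iff_iff]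
  simp only [List.any_eq_true, List.contains_eq_mem, Bool.or_eq_true, decide_eq_true_eq,
    Bool.and_eq_true, beq_iff_eq, Int.natAbs_eq_iff]
  constructor
  · rintro ⟨⟨x, y⟩, hmem, hx, hy⟩
    dsimp only at hy hx
    push_cast at hy
    rcases hy with h | h
    · right
      have hxy : (r, (c + 1 : Int)) = (x, y) := by
        rw [Prod.mk.injEq]; exact ⟨hx.symm, by omega⟩
      rw [hxy]; exact hmem
    · left
      have hxy : (r, (c - 1 : Int)) = (x, y) := by
        rw [Prod.mk.injEq]; exact ⟨hx.symm, by omega⟩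
      rw [hxy]; exact hmem
  · rintro (h | h)
    · exact ⟨(r, c - 1), h, rfl, by right; push_cast; ring⟩
    · exact ⟨(r, c + 1), h, rfl, by left; push_cast; ring⟩

-- ===== VERDICT (by name: the statement is the Claim_ definition above) =====
theorem is_corner_deadlock_py_spec : Claim_equal_is_corner_deadlock_py := by
  intro pos walls goals _
  unfold Spec_is_corner_deadlock_py is_corner_deadlock_py is_corner_deadlock_py_alt
  by_cases hg : goals.contains pos = true
  · rw [if_pos hg, if_pos hg]
  · rw [if_neg hg, if_neg hg]
    dsimp only
    rw [pv_fold_flags, pv_any_vert, pv_any_horiz]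
    cases h1 : walls.contains (pos.1 - 1, pos.2) <;>
    cases h2 : walls.contains (pos.1 + 1, pos.2) <;>
    cases h3 : walls.contains (pos.1, pos.2 - 1) <;>
    cases h4 : walls.contains (pos.1, pos.2 + 1) <;>
      (simp only [List.contains_eq_mem, decide_eq_true_eq, decide_eq_false_iff_not] at h1 h2 h3 h4 <;>
       simp [h1, h2, h3, h4])
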